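-- pv_equiv track=rewrite | github.com/sp9028/P1 | Rešitve starih izpitov/10.8.2.py | visinski_metri
-- ===== SOURCE A (Python) =====
-- def visinski_metri(pot, x, y, teren):
--     visinci = 0
--     visina = teren[y][x]
--     for korak in pot:
--         if korak == '<':
--             x -= 1
--         elif korak == '>':
--             x += 1
--         elif korak == "v":
--             y += 1
--         else:
--             y -= 1
--         nova_visina = teren[y][x]
--         if nova_visina > visina:
--             visinci += nova_visina - visina
--         visina = nova_visina
--
--     return visinci
-- ===== SOURCE B (Python) =====
-- def visinski_metri(pot, x, y, teren):
--     deltas = {'<': (-1, 0), '>': (1, 0), 'v': (0, 1)}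
--     heights = [teren[y][x]]
--     for korak in pot:
--         dx, dy = deltas.get(korak, (0, -1))
--         x += dx
--         y += dy
--         heights.append(teren[y][x])
--     return sum(max(0, b - a) for a, b in zip(heights, heights[1:]))
-- ===== Notes on version B (the rewrite author's own statement) =====
-- stated objective: alternative
-- what changed: B splits A's accumulate-as-you-go loop into two phases: a delta-dict walk that records the ordered list of visited heights, then a pairwise zip reduction sum(max(0, b-a)); A instead threads the previous height and the running total through one branching loop.
import Mathlib
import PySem

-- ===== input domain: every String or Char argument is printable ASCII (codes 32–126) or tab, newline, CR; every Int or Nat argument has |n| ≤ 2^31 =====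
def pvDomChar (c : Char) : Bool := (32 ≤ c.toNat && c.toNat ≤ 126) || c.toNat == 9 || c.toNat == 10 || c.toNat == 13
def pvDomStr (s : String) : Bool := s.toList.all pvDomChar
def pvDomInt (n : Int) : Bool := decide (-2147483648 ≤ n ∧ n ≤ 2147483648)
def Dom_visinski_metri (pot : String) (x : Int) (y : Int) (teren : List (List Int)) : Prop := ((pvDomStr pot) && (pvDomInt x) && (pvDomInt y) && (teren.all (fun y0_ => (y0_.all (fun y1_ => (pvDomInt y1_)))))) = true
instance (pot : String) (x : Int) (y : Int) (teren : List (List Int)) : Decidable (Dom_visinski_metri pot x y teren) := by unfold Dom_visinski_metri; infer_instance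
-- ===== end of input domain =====

-- B re-decomposes A's single accumulate-as-you-go loop into a build-heights phase (delta dict) and a pairwise zip/max reduction; return value only, no mutation.

-- shared accessor: teren[y][x] with Python's negative-index rule; .getD 0 is only reached
-- outside Pre_ (pyGet? = none is Python's IndexError, excluded by Pre_)
def pvGet2 (teren : List (List Int)) (y x : Int) : Int :=
  ((PySem.List.pyGet? teren y).bind (fun row => PySem.List.pyGet? row x)).getD 0

-- ===== PORT A =====
def pvStepA (x y : Int) (c : Char) : Int × Int :=
  if c = '<' then (x - 1, y)
  else if c = '>' then (x + 1, y)
  else if c = 'v' then (x, y + 1)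
  else (x, y - 1)

def visinski_metri (pot : String) (x : Int) (y : Int) (teren : List (List Int)) : Int :=
  (pot.toList.foldl
    (fun (s : Int × Int × Int × Int) c =>
      let p := pvStepA s.2.2.1 s.2.2.2 c
      let nv := pvGet2 teren p.2 p.1
      (s.1 + (if nv > s.2.1 then nv - s.2.1 else 0), nv, p.1, p.2))
    ((0 : Int), pvGet2 teren y x, x, y)).1

-- ===== PORT B =====
def pvDeltas : PySem.Dict Char (Int × Int) :=
  PySem.Dict.mk [('<', (-1, 0)), ('>', (1, 0)), ('v', (0, 1))]

def visinski_metri_alt (pot : String) (x : Int) (y : Int) (teren : List (List Int)) : Int :=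
  let st := pot.toList.foldl
    (fun (s : List Int × Int × Int) c =>
      let d := PySem.Dict.getD pvDeltas c (0, -1)
      let p := (s.2.1 + d.1, s.2.2 + d.2)
      (s.1 ++ [pvGet2 teren p.2 p.1], p.1, p.2))
    ([pvGet2 teren y x], x, y)
  (st.1.zip st.1.tail).foldl (fun a (p : Int × Int) => a + max 0 (p.2 - p.1)) 0

-- ===== PRECONDITION & SPEC =====
-- the positions visited after each step of the path (input data only; no heights, no accumulation)
def pvTrail (cs : List Char) (x y : Int) : List (Int × Int) :=
  match cs with
  | [] => []
  | c :: cs' => let p := pvStepA x y c; p :: pvTrail cs' p.1 p.2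

-- Pre_ excludes exactly the inputs where Python A raises IndexError: every visited
-- position (start included) must be a valid (possibly negative) index pair into teren.
def Pre_visinski_metri (pot : String) (x : Int) (y : Int) (teren : List (List Int)) : Prop :=
  (((x, y) :: pvTrail pot.toList x y).all
    (fun p => ((PySem.List.pyGet? teren p.2).bind (fun row => PySem.List.pyGet? row p.1)).isSome)) = true
instance (pot : String) (x : Int) (y : Int) (teren : List (List Int)) : Decidable (Pre_visinski_metri pot x y teren) := by unfold Pre_visinski_metri; infer_instance

def pvWitness_visinski_metri : String × Int × Int × List (List Int) := (">v", 0, 0, [[1, 3], [0, 7]])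

def Spec_visinski_metri (pot : String) (x : Int) (y : Int) (teren : List (List Int)) (out : Int) : Prop := out = visinski_metri_alt pot x y teren
instance (pot : String) (x : Int) (y : Int) (teren : List (List Int)) (out : Int) : Decidable (Spec_visinski_metri pot x y teren out) := by unfold Spec_visinski_metri; infer_instance

-- ===== CLAIM (what is proved, stated in full; the proofs are below) =====
def Claim_equal_visinski_metri : Prop := ∀ (pot : String) (x : Int) (y : Int) (teren : List (List Int)), Dom_visinski_metri pot x y teren → Pre_visinski_metri pot x y teren → Spec_visinski_metri pot x y teren (visinski_metri pot x y teren)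

-- ===== LEMMAS AND PROOFS =====

-- positive pairwise gains along a height list, seeded with the previous height
def pvPair (h : Int) (l : List Int) : Int :=
  match l with
  | [] => 0
  | b :: t => (if b > h then b - h else 0) + pvPair b t

-- B's dict step computes the same move as A's if-chain
lemma pvStep_eq (c : Char) (x y : Int) :
    (x + (PySem.Dict.getD pvDeltas c (0, -1)).1, y + (PySem.Dict.getD pvDeltas c (0, -1)).2)
      = pvStepA x y c := by
  by_cases h1 : c = '<'
  · subst h1; simp [pvDeltas, pvStepA, PySem.Dict.getD, PySem.Dict.get?_mk_cons]; omega
  · by_cases h2 : c = '>'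
    · subst h2; simp [pvDeltas, pvStepA, PySem.Dict.getD, PySem.Dict.get?_mk_cons]
    · by_cases h3 : c = 'v'
      · subst h3; simp [pvDeltas, pvStepA, PySem.Dict.getD, PySem.Dict.get?_mk_cons]
      · simp [pvDeltas, pvStepA, PySem.Dict.getD, PySem.Dict.get?,
          Ne.symm h1, Ne.symm h2, Ne.symm h3, h1, h2, h3]
        omega

-- A's fold equals the seeded pairwise-gain sum over the trail heights
lemma pvA_fold (teren : List (List Int)) :
    ∀ (cs : List Char) (acc h x y : Int),
      (cs.foldl
        (fun (s : Int × Int × Int × Int) c =>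
          let p := pvStepA s.2.2.1 s.2.2.2 c
          let nv := pvGet2 teren p.2 p.1
          (s.1 + (if nv > s.2.1 then nv - s.2.1 else 0), nv, p.1, p.2))
        (acc, h, x, y)).1
      = acc + pvPair h ((pvTrail cs x y).map (fun p => pvGet2 teren p.2 p.1)) := by
  intro cs
  induction cs with
  | nil => intro acc h x y; simp [pvTrail, pvPair]
  | cons c cs ih =>
      intro acc h x y
      simp only [List.foldl_cons, pvTrail, List.map_cons, pvPair]
      rw [ih]
      ring

-- B's first fold builds exactly hs ++ trail heights (only the heights component is needed)
lemma pvB_fold (teren : List (List Int)) :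
    ∀ (cs : List Char) (hs : List Int) (x y : Int),
      (cs.foldl
        (fun (s : List Int × Int × Int) c =>
          let d := PySem.Dict.getD pvDeltas c (0, -1)
          let p := (s.2.1 + d.1, s.2.2 + d.2)
          (s.1 ++ [pvGet2 teren p.2 p.1], p.1, p.2))
        (hs, x, y)).1
      = hs ++ (pvTrail cs x y).map (fun p => pvGet2 teren p.2 p.1) := by
  intro cs
  induction cs with
  | nil => intro hs x y; simp [pvTrail]
  | cons c cs ih =>
      intro hs x y
      have h := pvStep_eq c x y
      simp only [List.foldl_cons, pvTrail, List.map_cons, ← h]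
      rw [ih]
      simp

-- B's zip reduction equals the seeded pairwise-gain sum
lemma pvZip_sum :
    ∀ (t : List Int) (h a : Int),
      (((h :: t).zip t).foldl (fun acc (p : Int × Int) => acc + max 0 (p.2 - p.1)) a)
        = a + pvPair h t := by
  intro t
  induction t with
  | nil => intro h a; simp [pvPair]
  | cons b t ih =>
      intro h a
      simp only [List.zip_cons_cons, List.foldl_cons, pvPair]
      rw [ih]
      omega

-- ===== VERDICT (by name: the statement is the Claim_ definition above) =====
theorem visinski_metri_spec : Claim_equal_visinski_metri := by
  intro pot x y teren _ _
  simp only [Spec_visinski_metri, visinski_metri, visinski_metri_alt]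
  rw [pvA_fold, pvB_fold]
  simp only [List.singleton_append, List.tail_cons]
  rw [pvZip_sum]
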